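-- pv_equiv track=rewrite | github.com/Noam-Hadar/QuEltAlign | Sequence alignment/FASTA_indexer.py | CIGAR
-- ===== SOURCE A (Python) =====
-- def CIGAR(str1, str2):
--     m, n = len(str1), len(str2)
--     dp = [[0] * (n + 1) for _ in range(m + 1)]
--
--     # Initialize dynamic programming matrix
--     for i in range(m + 1):
--         dp[i][0] = i
--     for j in range(n + 1):
--         dp[0][j] = j
--
--     # Compute edit distance
--     for i in range(1, m + 1):
--         for j in range(1, n + 1):
--             if str1[i - 1] == str2[j - 1]:
--                 dp[i][j] = dp[i - 1][j - 1]
--             else: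
--                 dp[i][j] = 1 + min(dp[i - 1][j],      # Insertion
--                                    dp[i][j - 1],      # Deletion
--                                    dp[i - 1][j - 1])  # Substitution
--
--     # Traceback for CIGAR string
--     cigar = []
--     i, j = m, n
--     while i > 0 or j > 0:
--         if i > 0 and dp[i][j] == dp[i - 1][j] + 1:
--             cigar.append('D')  # Deletion
--             i -= 1
--         elif j > 0 and dp[i][j] == dp[i][j - 1] + 1:
--             cigar.append('I')  # Insertion
--             j -= 1
--         else:
--             cigar.append('M' if str1[i - 1] == str2[j - 1] else 'X')  # Match or Mismatch
--             i -= 1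
--             j -= 1
--
--     # Reverse and compress CIGAR string
--     compressed_cigar = []
--     last_char = cigar[0]
--     count = 1
--     for c in cigar[1:] + ['']:
--         if c == last_char:
--             count += 1
--         else:
--             compressed_cigar.append(f'{count}{last_char}')
--             count = 1
--             last_char = c
--
--     return ''.join(compressed_cigar[::-1])
-- ===== SOURCE B (Python) =====
-- def CIGAR(str1, str2):
--     m, n = len(str1), len(str2)
--     # Single forward sweep: each cell carries (cost, chain) where chain is a persistent
--     # linked alignment (op, parent) shared between cells; only the previous row is kept
--     # and there is no traceback phase at all.
--     row = [(0, None)]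
--     for j in range(1, n + 1):
--         row.append((j, ('I', row[j - 1][1])))
--     for i in range(1, m + 1):
--         prev = row
--         row = [(i, ('D', prev[0][1]))]
--         for j in range(1, n + 1):
--             eq = str1[i - 1] == str2[j - 1]
--             cost = prev[j - 1][0] if eq else 1 + min(prev[j][0], row[j - 1][0], prev[j - 1][0])
--             if cost == prev[j][0] + 1:
--                 chain = ('D', prev[j][1])
--             elif cost == row[j - 1][0] + 1:
--                 chain = ('I', row[j - 1][1])
--             else:
--                 chain = ('M' if eq else 'X', prev[j - 1][1])
--             row.append((cost, chain))
--     ops = []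
--     chain = row[n][1]
--     while chain is not None:
--         ops.append(chain[0])
--         chain = chain[1]
--     ops.reverse()
--     out = []
--     k = 0
--     while k < len(ops):
--         r = k + 1
--         while r < len(ops) and ops[r] == ops[k]:
--             r += 1
--         out.append(f'{r - k}{ops[k]}')
--         k = r
--     return ''.join(out)
-- ===== Notes on version B (the rewrite author's own statement) =====
-- stated objective: alternative
-- what changed: B eliminates the full DP matrix and the backward traceback entirely: a single forward sweep keeps only the previous row, each cell carrying (cost, persistent linked alignment chain) extended in O(1) with the traceback priority, and the final cell's chain is unravelled and run-length encoded forward, versus A's full matrix, arithmetic backward traceback and backward RLE reversed at the end.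
import Mathlib
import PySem

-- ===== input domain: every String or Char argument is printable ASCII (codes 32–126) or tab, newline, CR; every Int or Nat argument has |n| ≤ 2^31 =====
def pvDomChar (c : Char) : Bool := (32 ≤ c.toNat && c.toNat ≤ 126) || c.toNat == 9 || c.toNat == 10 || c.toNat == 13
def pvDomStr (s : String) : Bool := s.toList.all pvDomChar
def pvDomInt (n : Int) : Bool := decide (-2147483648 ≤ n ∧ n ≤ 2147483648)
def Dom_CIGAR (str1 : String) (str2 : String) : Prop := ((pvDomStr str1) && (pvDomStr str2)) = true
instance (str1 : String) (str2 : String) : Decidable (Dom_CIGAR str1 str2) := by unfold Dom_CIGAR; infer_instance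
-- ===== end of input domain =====

-- B replaces A's full matrix + arithmetic traceback + backward RLE by a single forward
-- sweep in which every cell carries (cost, persistent alignment chain) with only the
-- previous row kept, followed by a forward RLE; Pre_ excludes ("","") where A raises
-- IndexError. Python's (op, parent) chain (last op outermost) is ported as a cons list.


-- ===== PORT A =====

-- d[i][j] read / write on A's list-of-lists matrix
def pvMget (d : List (List Int)) (i j : Nat) : Int := (d.getD i []).getD j 0
def pvMset (d : List (List Int)) (i j : Nat) (v : Int) : List (List Int) :=
  d.set i ((d.getD i []).set j v)

-- dp = [[0] * (n + 1) for _ in range(m + 1)]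
def pvDp0 (m n : Nat) : List (List Int) :=
  (List.range (m+1)).map (fun _ => (List.range (n+1)).map (fun _ => (0:Int)))

-- for i in range(m + 1): dp[i][0] = i
def pvDp1 (m n : Nat) : List (List Int) :=
  (List.range (m+1)).foldl (fun d i => pvMset d i 0 (i:Int)) (pvDp0 m n)

-- for j in range(n + 1): dp[0][j] = j
def pvDp2 (m n : Nat) : List (List Int) :=
  (List.range (n+1)).foldl (fun d j => pvMset d 0 j (j:Int)) (pvDp1 m n)

-- body of the inner fill loop (i = i0+1 runs over range(1, m+1), j = j0+1 over range(1, n+1))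
def pvFillStep (s1 s2 : List Char) (i0 : Nat) (d : List (List Int)) (j0 : Nat) : List (List Int) :=
  let i := i0 + 1
  let j := j0 + 1
  if s1.getD (i-1) ' ' = s2.getD (j-1) ' ' then
    pvMset d i j (pvMget d (i-1) (j-1))
  else
    pvMset d i j (1 + min (min (pvMget d (i-1) j) (pvMget d i (j-1))) (pvMget d (i-1) (j-1)))

def pvFillRow (s1 s2 : List Char) (d : List (List Int)) (i0 : Nat) : List (List Int) :=
  (List.range s2.length).foldl (pvFillStep s1 s2 i0) d

def pvDpA (s1 s2 : List Char) : List (List Int) :=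
  (List.range s1.length).foldl (pvFillRow s1 s2) (pvDp2 s1.length s2.length)

-- the traceback while-loop (i, j stay ≥ 0 in Python; ported on Nat; the fuel only
-- makes the loop total — m+n steps always suffice, each step decreases i+j)
def pvTbA (s1 s2 : List Char) (d : List (List Int)) : Nat → Nat → Nat → List String
  | 0, _, _ => []
  | fuel+1, i, j =>
    if i > 0 ∨ j > 0 then
      if i > 0 ∧ pvMget d i j = pvMget d (i-1) j + 1 then
        "D" :: pvTbA s1 s2 d fuel (i-1) j
      else if j > 0 ∧ pvMget d i j = pvMget d i (j-1) + 1 then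
        "I" :: pvTbA s1 s2 d fuel i (j-1)
      else
        (if s1.getD (i-1) ' ' = s2.getD (j-1) ' ' then "M" else "X") :: pvTbA s1 s2 d fuel (i-1) (j-1)
    else []

-- body of the compress loop
def pvCompStep (st : List String × String × Int) (c : String) : List String × String × Int :=
  if c = st.2.1 then (st.1, st.2.1, st.2.2 + 1)
  else (st.1 ++ [PySem.Int.toStr st.2.2 ++ st.2.1], c, 1)

-- reverse-and-compress loop; cigar[0] raises IndexError on empty (excluded by Pre_)
def pvCompA (cigar : List String) : String :=
  let last0 := (PySem.List.pyGet? cigar 0).getD ""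
  let st := (cigar.drop 1 ++ [""]).foldl pvCompStep ([], last0, 1)
  PySem.Str.join "" st.1.reverse

def CIGAR (str1 : String) (str2 : String) : String :=
  let s1 := str1.toList
  let s2 := str2.toList
  let dp := pvDpA s1 s2
  pvCompA (pvTbA s1 s2 dp (s1.length + s2.length) s1.length s2.length)

-- ===== PORT B =====

-- row = [(0, None)]; for j in range(1, n+1): row.append((j, ('I', row[j-1][1])))
def pvRow0B (n : Nat) : List (Int × List String) :=
  (List.range n).foldl (fun row (j0 : Nat) =>
    row ++ [(((j0:Int)+1), "I" :: (row.getD j0 ((0:Int),[])).2)]) [((0:Int), [])]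

-- body of B's inner loop (j = j0+1 runs over range(1, n+1))
def pvCellB (s1 s2 : List Char) (prev : List (Int × List String)) (i : Nat)
    (row : List (Int × List String)) (j0 : Nat) : List (Int × List String) :=
  let j := j0 + 1
  let up := prev.getD j ((0:Int), [])
  let lf := row.getD (j-1) ((0:Int), [])
  let dg := prev.getD (j-1) ((0:Int), [])
  let cost : Int := if s1.getD (i-1) ' ' = s2.getD (j-1) ' ' then dg.1
                    else 1 + min (min up.1 lf.1) dg.1
  let chain := if cost = up.1 + 1 then "D" :: up.2
               else if cost = lf.1 + 1 then "I" :: lf.2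
               else (if s1.getD (i-1) ' ' = s2.getD (j-1) ' ' then "M" else "X") :: dg.2
  row ++ [(cost, chain)]

-- one sweep row: row = [(i, ('D', prev[0][1]))]; inner loop appends the cells
def pvSweepRowB (s1 s2 : List Char) (prev : List (Int × List String)) (i : Nat) :
    List (Int × List String) :=
  (List.range s2.length).foldl (pvCellB s1 s2 prev i)
    [((i:Int), "D" :: (prev.getD 0 ((0:Int),[])).2)]

def pvLastRowB (s1 s2 : List Char) : List (Int × List String) :=
  (List.range s1.length).foldl (fun row i0 => pvSweepRowB s1 s2 row (i0+1)) (pvRow0B s2.length)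

-- r = k+1; while r < len(ops) and ops[r] == ops[k]: r += 1   (run length past ops[k])
def pvCountRun (c : String) : List String → Nat
  | [] => 0
  | x :: t => if x = c then 1 + pvCountRun c t else 0

-- out.append(f'{r-k}{ops[k]}'); k = r   (forward run-length encoding; the fuel only
-- makes the loop total — len(ops) steps always suffice, each step drops ≥ 1 element)
def pvRleB : Nat → List String → List String
  | 0, _ => []
  | _, [] => []
  | fuel+1, a :: t =>
    let run := 1 + pvCountRun a t
    (PySem.Int.toStr (run : Int) ++ a) :: pvRleB fuel ((a :: t).drop run)

-- the chain-unravelling while loop collects last-to-first ops; ops.reverse() makes them forward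
def CIGAR_alt (str1 : String) (str2 : String) : String :=
  let s1 := str1.toList
  let s2 := str2.toList
  let ops := (((pvLastRowB s1 s2).getD s2.length ((0:Int), [])).2).reverse
  PySem.Str.join "" (pvRleB ops.length ops)

-- ===== PRECONDITION & SPEC =====
-- Pre_ excludes only the input ("", ""), on which A raises IndexError (cigar[0] of the
-- empty traceback); B returns "" there.
def Pre_CIGAR (str1 : String) (str2 : String) : Prop := ¬ (str1 = "" ∧ str2 = "")
instance (str1 : String) (str2 : String) : Decidable (Pre_CIGAR str1 str2) := by
  unfold Pre_CIGAR; infer_instance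

def pvWitness_CIGAR : String × String := ("AC", "AB")

def Spec_CIGAR (str1 : String) (str2 : String) (out : String) : Prop := out = CIGAR_alt str1 str2
instance (str1 : String) (str2 : String) (out : String) : Decidable (Spec_CIGAR str1 str2 out) := by
  unfold Spec_CIGAR; infer_instance

-- ===== CLAIM (what is proved, stated in full; the proofs are below) =====
def Claim_equal_CIGAR : Prop := ∀ (str1 : String) (str2 : String), Dom_CIGAR str1 str2 → Pre_CIGAR str1 str2 → Spec_CIGAR str1 str2 (CIGAR str1 str2)

-- ===== LEMMAS AND PROOFS =====

-- ---- list getD / set / append helpers ----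

theorem pv_getD_set_self {α : Type} : ∀ (l : List α) (j : Nat) (v d : α),
    j < l.length → (l.set j v).getD j d = v := by
  intro l
  induction l with
  | nil => intro j v d h; simp at h
  | cons x xs ih =>
    intro j v d h
    cases j with
    | zero => simp
    | succ k => simp only [List.set_cons_succ, List.getD_cons_succ]; exact ih k v d (by simpa using h)

theorem pv_getD_set_ne {α : Type} : ∀ (l : List α) (i j : Nat) (v d : α),
    i ≠ j → (l.set i v).getD j d = l.getD j d := by
  intro l
  induction l with
  | nil => intro i j v d _; simp
  | cons x xs ih =>
    intro i j v d hne
    cases i with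
    | zero =>
      cases j with
      | zero => exact absurd rfl hne
      | succ k => simp
    | succ i' =>
      cases j with
      | zero => simp
      | succ k => simpa using ih i' k v d (by omega)

theorem pv_getD_append_lt {α : Type} : ∀ (l l' : List α) (k : Nat) (d : α),
    k < l.length → (l ++ l').getD k d = l.getD k d := by
  intro l
  induction l with
  | nil => intro l' k d h; simp at h
  | cons x xs ih =>
    intro l' k d h
    cases k with
    | zero => simp
    | succ k' => simpa using ih l' k' d (by simpa using h)

theorem pv_getD_append_len {α : Type} : ∀ (l : List α) (v d : α),
    (l ++ [v]).getD l.length d = v := by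
  intro l
  induction l with
  | nil => intro v d; simp
  | cons x xs ih => intro v d; simpa using ih v d

theorem pv_getD_map_range {α : Type} (f : Nat → α) (n k : Nat) (d : α) (h : k < n) :
    ((List.range n).map f).getD k d = f k := by
  rw [List.getD_eq_getElem?_getD]
  simp [h]

theorem pv_foldl_range_succ {β : Type} (f : β → Nat → β) (b : β) (k : Nat) :
    (List.range (k+1)).foldl f b = f ((List.range k).foldl f b) k := by
  rw [List.range_succ, List.foldl_append]
  rfl

theorem pv_getD_append_len' {α : Type} (l : List α) (v d : α) (t : Nat) (h : l.length = t) :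
    (l ++ [v]).getD t d = v := by
  subst h
  exact pv_getD_append_len l v d

-- ---- matrix shape ----

def pvShape (d : List (List Int)) (m n : Nat) : Prop :=
  d.length = m + 1 ∧ ∀ k, k ≤ m → (d.getD k []).length = n + 1

theorem pvShape_mset {d : List (List Int)} {m n i j : Nat} (v : Int)
    (h : pvShape d m n) (hi : i ≤ m) : pvShape (pvMset d i j v) m n := by
  obtain ⟨hlen, hrow⟩ := h
  constructor
  · simp [pvMset, hlen]
  · intro k hk
    by_cases hik : i = k
    · subst hik
      rw [pvMset, pv_getD_set_self _ _ _ _ (by omega), List.length_set]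
      exact hrow i hi
    · rw [pvMset, pv_getD_set_ne _ _ _ _ _ hik]
      exact hrow k hk

theorem pvMget_mset_self {d : List (List Int)} {m n i j : Nat} (v : Int)
    (h : pvShape d m n) (hi : i ≤ m) (hj : j ≤ n) :
    pvMget (pvMset d i j v) i j = v := by
  obtain ⟨hlen, hrow⟩ := h
  rw [pvMget, pvMset, pv_getD_set_self _ _ _ _ (by omega),
    pv_getD_set_self _ _ _ _ (by rw [hrow i hi]; omega)]

theorem pvMget_mset_ne {d : List (List Int)} {i j i' j' : Nat} (v : Int)
    (h : i ≠ i' ∨ j ≠ j') :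
    pvMget (pvMset d i j v) i' j' = pvMget d i' j' := by
  rcases h with h | h
  · rw [pvMget, pvMset, pv_getD_set_ne _ _ _ _ _ h, pvMget]
  · by_cases hii : i = i'
    · subst hii
      by_cases hlt : i < d.length
      · rw [pvMget, pvMset, pv_getD_set_self _ _ _ _ hlt, pv_getD_set_ne _ _ _ _ _ h, pvMget]
      · rw [pvMget, pvMset, List.set_eq_of_length_le (by omega), pvMget]
    · rw [pvMget, pvMset, pv_getD_set_ne _ _ _ _ _ hii, pvMget]

-- ---- the edit-distance recurrence (common mathematical value of both DP fills) ----

def pvE (s1 s2 : List Char) : Nat → Nat → Int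
  | i, 0 => (i : Int)
  | 0, j+1 => ((j : Int) + 1)
  | i+1, j+1 =>
    if s1.getD i ' ' = s2.getD j ' ' then pvE s1 s2 i j
    else 1 + min (min (pvE s1 s2 i (j+1)) (pvE s1 s2 (i+1) j)) (pvE s1 s2 i j)
  termination_by i j => i + j
  decreasing_by all_goals omega

theorem pvE_i0 (s1 s2 : List Char) (i : Nat) : pvE s1 s2 i 0 = (i : Int) := by
  cases i <;> simp [pvE]

theorem pvE_0j (s1 s2 : List Char) (j : Nat) : pvE s1 s2 0 j = (j : Int) := by
  cases j <;> simp [pvE]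

theorem pvE_succ (s1 s2 : List Char) (i j : Nat) :
    pvE s1 s2 (i+1) (j+1) =
      if s1.getD i ' ' = s2.getD j ' ' then pvE s1 s2 i j
      else 1 + min (min (pvE s1 s2 i (j+1)) (pvE s1 s2 (i+1) j)) (pvE s1 s2 i j) := by
  simp [pvE]

-- ---- A's matrix computes pvE ----

theorem pvDp0_char (m n : Nat) : pvShape (pvDp0 m n) m n ∧
    ∀ i ≤ m, ∀ j ≤ n, pvMget (pvDp0 m n) i j = 0 := by
  refine ⟨⟨by simp [pvDp0], ?_⟩, ?_⟩
  · intro k hk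
    rw [pvDp0, pv_getD_map_range _ _ _ _ (by omega)]
    simp
  · intro i hi j hj
    rw [pvMget, pvDp0, pv_getD_map_range _ _ _ _ (by omega),
      pv_getD_map_range _ _ _ _ (by omega)]

theorem pvDp1_char (m n : Nat) : pvShape (pvDp1 m n) m n ∧
    ∀ i ≤ m, ∀ j ≤ n, pvMget (pvDp1 m n) i j = if j = 0 then (i : Int) else 0 := by
  have key : ∀ k, k ≤ m + 1 →
      pvShape ((List.range k).foldl (fun d i => pvMset d i 0 (i:Int)) (pvDp0 m n)) m n ∧
      ∀ i ≤ m, ∀ j ≤ n,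
        pvMget ((List.range k).foldl (fun d i => pvMset d i 0 (i:Int)) (pvDp0 m n)) i j =
          if i < k ∧ j = 0 then (i : Int) else 0 := by
    intro k
    induction k with
    | zero =>
      intro _
      simp only [List.range_zero, List.foldl_nil]
      refine ⟨(pvDp0_char m n).1, ?_⟩
      intro i hi j hj
      simp [(pvDp0_char m n).2 i hi j hj]
    | succ k ih =>
      intro hk
      obtain ⟨hS, hV⟩ := ih (by omega)
      rw [pv_foldl_range_succ]
      refine ⟨pvShape_mset _ hS (by omega), ?_⟩
      intro i hi j hj
      by_cases hcase : i = k ∧ j = 0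
      · obtain ⟨h1, h2⟩ := hcase
        subst h1; subst h2
        rw [pvMget_mset_self _ hS hi (by omega)]
        simp
      · rw [pvMget_mset_ne _ (by omega), hV i hi j hj]
        split_ifs <;> first | rfl | omega
  obtain ⟨hS, hV⟩ := key (m+1) (le_refl _)
  refine ⟨hS, ?_⟩
  intro i hi j hj
  rw [pvDp1, hV i hi j hj]
  split_ifs <;> first | rfl | omega

theorem pvDp2_char (m n : Nat) : pvShape (pvDp2 m n) m n ∧
    ∀ i ≤ m, ∀ j ≤ n, pvMget (pvDp2 m n) i j =
      if i = 0 then (j : Int) else if j = 0 then (i : Int) else 0 := by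
  have key : ∀ k, k ≤ n + 1 →
      pvShape ((List.range k).foldl (fun d j => pvMset d 0 j (j:Int)) (pvDp1 m n)) m n ∧
      ∀ i ≤ m, ∀ j ≤ n,
        pvMget ((List.range k).foldl (fun d j => pvMset d 0 j (j:Int)) (pvDp1 m n)) i j =
          if i = 0 ∧ j < k then (j : Int) else if j = 0 then (i : Int) else 0 := by
    intro k
    induction k with
    | zero =>
      intro _
      simp only [List.range_zero, List.foldl_nil]
      refine ⟨(pvDp1_char m n).1, ?_⟩
      intro i hi j hj
      rw [(pvDp1_char m n).2 i hi j hj]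
      split_ifs <;> first | rfl | omega
    | succ k ih =>
      intro hk
      obtain ⟨hS, hV⟩ := ih (by omega)
      rw [pv_foldl_range_succ]
      refine ⟨pvShape_mset _ hS (by omega), ?_⟩
      intro i hi j hj
      by_cases hcase : i = 0 ∧ j = k
      · obtain ⟨h1, h2⟩ := hcase
        subst h1; subst h2
        rw [pvMget_mset_self _ hS (by omega) (by omega)]
        simp
      · rw [pvMget_mset_ne _ (by omega), hV i hi j hj]
        split_ifs <;> first | rfl | omega
  obtain ⟨hS, hV⟩ := key (n+1) (le_refl _)
  refine ⟨hS, ?_⟩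
  intro i hi j hj
  rw [pvDp2, hV i hi j hj]
  split_ifs <;> first | rfl | omega

theorem pvFillRow_char (s1 s2 : List Char) (i0 : Nat) (hi : i0 < s1.length)
    (d0 : List (List Int)) (hS : pvShape d0 s1.length s2.length)
    (hprev : ∀ i' ≤ i0, ∀ j ≤ s2.length, pvMget d0 i' j = pvE s1 s2 i' j)
    (hcol : ∀ i', i0 < i' → i' ≤ s1.length → pvMget d0 i' 0 = (i' : Int)) :
    pvShape (pvFillRow s1 s2 d0 i0) s1.length s2.length ∧
    (∀ i' ≤ i0 + 1, ∀ j ≤ s2.length, pvMget (pvFillRow s1 s2 d0 i0) i' j = pvE s1 s2 i' j) ∧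
    (∀ i', i0 + 1 < i' → i' ≤ s1.length → pvMget (pvFillRow s1 s2 d0 i0) i' 0 = (i' : Int)) := by
  have key : ∀ t, t ≤ s2.length →
      pvShape ((List.range t).foldl (pvFillStep s1 s2 i0) d0) s1.length s2.length ∧
      (∀ i' ≤ i0, ∀ j ≤ s2.length,
        pvMget ((List.range t).foldl (pvFillStep s1 s2 i0) d0) i' j = pvE s1 s2 i' j) ∧
      (∀ j ≤ t, pvMget ((List.range t).foldl (pvFillStep s1 s2 i0) d0) (i0+1) j = pvE s1 s2 (i0+1) j) ∧
      (∀ i', i0 < i' → i' ≤ s1.length →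
        pvMget ((List.range t).foldl (pvFillStep s1 s2 i0) d0) i' 0 = (i' : Int)) := by
    intro t
    induction t with
    | zero =>
      intro _
      simp only [List.range_zero, List.foldl_nil]
      refine ⟨hS, fun i' h j hj => hprev i' h j hj, ?_, hcol⟩
      intro j hj
      have hj0 : j = 0 := by omega
      subst hj0
      rw [hcol (i0+1) (by omega) (by omega), pvE_i0]
    | succ t ih =>
      intro ht
      obtain ⟨hS', hlow, hrow, hcol'⟩ := ih (by omega)
      rw [pv_foldl_range_succ]
      set dt := (List.range t).foldl (pvFillStep s1 s2 i0) d0 with hdt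
      have hval : pvFillStep s1 s2 i0 dt t =
          pvMset dt (i0+1) (t+1) (pvE s1 s2 (i0+1) (t+1)) := by
        rw [pvFillStep]
        simp only [Nat.add_sub_cancel]
        rw [hlow i0 (le_refl _) t (by omega), hlow i0 (le_refl _) (t+1) (by omega),
          hrow t (le_refl _)]
        by_cases hch : s1.getD i0 ' ' = s2.getD t ' '
        · rw [pvE_succ, if_pos hch, if_pos hch]
        · rw [pvE_succ, if_neg hch, if_neg hch]
      rw [hval]
      refine ⟨pvShape_mset _ hS' (by omega), ?_, ?_, ?_⟩
      · intro i' hi' j hj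
        rw [pvMget_mset_ne _ (by omega)]
        exact hlow i' hi' j hj
      · intro j hj
        by_cases hjt : j = t + 1
        · subst hjt
          rw [pvMget_mset_self _ hS' (by omega) (by omega)]
        · rw [pvMget_mset_ne _ (by omega)]
          exact hrow j (by omega)
      · intro i' h1 h2
        rw [pvMget_mset_ne _ (by omega)]
        exact hcol' i' h1 h2
  obtain ⟨hS', hlow, hrow, hcol'⟩ := key s2.length (le_refl _)
  refine ⟨hS', ?_, ?_⟩
  · intro i' hi' j hj
    by_cases h : i' = i0 + 1
    · subst h; exact hrow j hj
    · exact hlow i' (by omega) j hj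
  · intro i' h1 h2
    exact hcol' i' (by omega) h2

theorem pvDpA_char (s1 s2 : List Char) :
    ∀ i ≤ s1.length, ∀ j ≤ s2.length, pvMget (pvDpA s1 s2) i j = pvE s1 s2 i j := by
  have key : ∀ k, k ≤ s1.length →
      pvShape ((List.range k).foldl (pvFillRow s1 s2) (pvDp2 s1.length s2.length)) s1.length s2.length ∧
      (∀ i ≤ k, ∀ j ≤ s2.length,
        pvMget ((List.range k).foldl (pvFillRow s1 s2) (pvDp2 s1.length s2.length)) i j = pvE s1 s2 i j) ∧
      (∀ i', k < i' → i' ≤ s1.length →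
        pvMget ((List.range k).foldl (pvFillRow s1 s2) (pvDp2 s1.length s2.length)) i' 0 = (i' : Int)) := by
    intro k
    induction k with
    | zero =>
      intro _
      simp only [List.range_zero, List.foldl_nil]
      obtain ⟨hS, hV⟩ := pvDp2_char s1.length s2.length
      refine ⟨hS, ?_, ?_⟩
      · intro i hi j hj
        have hi0 : i = 0 := by omega
        subst hi0
        rw [hV 0 (by omega) j hj, pvE_0j]
        simp
      · intro i' h1 h2
        rw [hV i' h2 0 (by omega)]
        split_ifs <;> first | rfl | omega
    | succ k ih =>
      intro hk
      obtain ⟨hS, hlow, hcol⟩ := ih (by omega)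
      rw [pv_foldl_range_succ]
      exact pvFillRow_char s1 s2 k (by omega) _ hS hlow hcol
  intro i hi j hj
  exact ((key s1.length (le_refl _)).2.1) i hi j hj

-- ---- the forward alignment chain (mathematical value of B's per-cell chains) ----

def pvRT (s1 s2 : List Char) : Nat → Nat → List String
  | i, j =>
    if i > 0 ∨ j > 0 then
      if i > 0 ∧ pvE s1 s2 i j = pvE s1 s2 (i-1) j + 1 then
        "D" :: pvRT s1 s2 (i-1) j
      else if j > 0 ∧ pvE s1 s2 i j = pvE s1 s2 i (j-1) + 1 then
        "I" :: pvRT s1 s2 i (j-1)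
      else
        (if s1.getD (i-1) ' ' = s2.getD (j-1) ' ' then "M" else "X") ::
          pvRT s1 s2 (i-1) (j-1)
    else []
  termination_by i j => i + j
  decreasing_by all_goals omega

theorem pvRT_00 (s1 s2 : List Char) : pvRT s1 s2 0 0 = [] := by
  rw [pvRT]; simp

theorem pvRT_i0 (s1 s2 : List Char) (i : Nat) :
    pvRT s1 s2 (i+1) 0 = "D" :: pvRT s1 s2 i 0 := by
  have hc : (i+1) > 0 ∧ pvE s1 s2 (i+1) 0 = pvE s1 s2 ((i+1)-1) 0 + 1 := by
    refine ⟨by omega, ?_⟩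
    rw [pvE_i0, pvE_i0]
    push_cast
    ring
  rw [pvRT, if_pos (Or.inl hc.1), if_pos hc]
  simp

theorem pvRT_0j (s1 s2 : List Char) (j : Nat) :
    pvRT s1 s2 0 (j+1) = "I" :: pvRT s1 s2 0 j := by
  have hn : ¬ ((0:Nat) > 0 ∧ pvE s1 s2 0 (j+1) = pvE s1 s2 (0-1) (j+1) + 1) :=
    fun h => absurd h.1 (by omega)
  have hc : (j+1) > 0 ∧ pvE s1 s2 0 (j+1) = pvE s1 s2 0 ((j+1)-1) + 1 := by
    refine ⟨by omega, ?_⟩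
    rw [pvE_0j, pvE_0j]
    push_cast
    ring
  rw [pvRT, if_pos (Or.inr hc.1), if_neg hn, if_pos hc]
  simp

theorem pvRT_succ (s1 s2 : List Char) (i j : Nat) :
    pvRT s1 s2 (i+1) (j+1) =
      if pvE s1 s2 (i+1) (j+1) = pvE s1 s2 i (j+1) + 1 then "D" :: pvRT s1 s2 i (j+1)
      else if pvE s1 s2 (i+1) (j+1) = pvE s1 s2 (i+1) j + 1 then "I" :: pvRT s1 s2 (i+1) j
      else (if s1.getD i ' ' = s2.getD j ' ' then "M" else "X") :: pvRT s1 s2 i j := by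
  rw [pvRT, if_pos (by omega : (i+1) > 0 ∨ (j+1) > 0)]
  simp only [Nat.add_sub_cancel]
  by_cases h1 : pvE s1 s2 (i+1) (j+1) = pvE s1 s2 i (j+1) + 1
  · rw [if_pos ⟨by omega, h1⟩, if_pos h1]
  · rw [if_neg (by simp [h1]), if_neg h1]
    by_cases h2 : pvE s1 s2 (i+1) (j+1) = pvE s1 s2 (i+1) j + 1
    · rw [if_pos ⟨by omega, h2⟩, if_pos h2]
    · rw [if_neg (by simp [h2]), if_neg h2]

-- ---- B's rows compute (pvE, pvRT) ----

theorem pvRow0B_char (s1 s2 : List Char) :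
    (pvRow0B s2.length).length = s2.length + 1 ∧
    ∀ j ≤ s2.length, (pvRow0B s2.length).getD j ((0:Int),[]) = (pvE s1 s2 0 j, pvRT s1 s2 0 j) := by
  have key : ∀ t, t ≤ s2.length →
      (((List.range t).foldl (fun row (j0 : Nat) =>
        row ++ [(((j0:Int)+1), "I" :: (row.getD j0 ((0:Int),[])).2)]) [((0:Int), [])]).length = t + 1) ∧
      ∀ j ≤ t, ((List.range t).foldl (fun row (j0 : Nat) =>
        row ++ [(((j0:Int)+1), "I" :: (row.getD j0 ((0:Int),[])).2)]) [((0:Int), [])]).getD j ((0:Int),[])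
          = (pvE s1 s2 0 j, pvRT s1 s2 0 j) := by
    intro t
    induction t with
    | zero =>
      intro _
      simp only [List.range_zero, List.foldl_nil]
      refine ⟨by simp, ?_⟩
      intro j hj
      have hj0 : j = 0 := by omega
      subst hj0
      simp [pvE_0j, pvRT_00]
    | succ t ih =>
      intro ht
      obtain ⟨hl, hv⟩ := ih (by omega)
      rw [pv_foldl_range_succ]
      set Rt := (List.range t).foldl (fun row (j0 : Nat) =>
        row ++ [(((j0:Int)+1), "I" :: (row.getD j0 ((0:Int),[])).2)]) [((0:Int), [])] with hRt
      refine ⟨by simp [hl], ?_⟩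
      intro j hj
      by_cases hjt : j = t + 1
      · subst hjt
        rw [pv_getD_append_len' _ _ _ _ hl, hv t (le_refl _)]
        rw [pvE_0j, pvE_0j, pvRT_0j]
        simp
      · rw [pv_getD_append_lt _ _ _ _ (by omega)]
        exact hv j (by omega)
  obtain ⟨hl, hv⟩ := key s2.length (le_refl _)
  exact ⟨by rw [pvRow0B]; exact hl, by rw [pvRow0B]; exact hv⟩

theorem pvSweepRowB_char (s1 s2 : List Char) (prev : List (Int × List String)) (i0 : Nat)
    (hprev : ∀ j ≤ s2.length, prev.getD j ((0:Int),[]) = (pvE s1 s2 i0 j, pvRT s1 s2 i0 j)) :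
    (pvSweepRowB s1 s2 prev (i0+1)).length = s2.length + 1 ∧
    ∀ j ≤ s2.length, (pvSweepRowB s1 s2 prev (i0+1)).getD j ((0:Int),[])
      = (pvE s1 s2 (i0+1) j, pvRT s1 s2 (i0+1) j) := by
  have hhead : [(((i0+1:Nat):Int), "D" :: (prev.getD 0 ((0:Int),[])).2)]
      = [(pvE s1 s2 (i0+1) 0, pvRT s1 s2 (i0+1) 0)] := by
    rw [hprev 0 (by omega), pvRT_i0]
    simp [pvE_i0]
  have key : ∀ t, t ≤ s2.length →
      (((List.range t).foldl (pvCellB s1 s2 prev (i0+1))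
        [(pvE s1 s2 (i0+1) 0, pvRT s1 s2 (i0+1) 0)]).length = t + 1) ∧
      ∀ j ≤ t, ((List.range t).foldl (pvCellB s1 s2 prev (i0+1))
        [(pvE s1 s2 (i0+1) 0, pvRT s1 s2 (i0+1) 0)]).getD j ((0:Int),[])
          = (pvE s1 s2 (i0+1) j, pvRT s1 s2 (i0+1) j) := by
    intro t
    induction t with
    | zero =>
      intro _
      simp only [List.range_zero, List.foldl_nil]
      refine ⟨by simp, ?_⟩
      intro j hj
      have hj0 : j = 0 := by omega
      subst hj0
      simp
    | succ t ih =>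
      intro ht
      obtain ⟨hl, hv⟩ := ih (by omega)
      rw [pv_foldl_range_succ]
      set Rt := (List.range t).foldl (pvCellB s1 s2 prev (i0+1))
        [(pvE s1 s2 (i0+1) 0, pvRT s1 s2 (i0+1) 0)] with hRt
      have hcost : (if s1.getD i0 ' ' = s2.getD t ' ' then pvE s1 s2 i0 t
            else 1 + min (min (pvE s1 s2 i0 (t+1)) (pvE s1 s2 (i0+1) t)) (pvE s1 s2 i0 t))
            = pvE s1 s2 (i0+1) (t+1) := (pvE_succ s1 s2 i0 t).symm
      have hstep : pvCellB s1 s2 prev (i0+1) Rt t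
          = Rt ++ [(pvE s1 s2 (i0+1) (t+1), pvRT s1 s2 (i0+1) (t+1))] := by
        rw [pvCellB]
        simp only [Nat.add_sub_cancel, hprev (t+1) (by omega), hprev t (by omega),
          hv t (le_refl _)]
        rw [hcost, pvRT_succ]
      rw [hstep]
      refine ⟨by simp [hl], ?_⟩
      intro j hj
      by_cases hjt : j = t + 1
      · subst hjt
        rw [pv_getD_append_len' _ _ _ _ hl]
      · rw [pv_getD_append_lt _ _ _ _ (by omega)]
        exact hv j (by omega)
  obtain ⟨hl, hv⟩ := key s2.length (le_refl _)
  rw [pvSweepRowB, hhead]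
  exact ⟨hl, hv⟩

theorem pvLastRowB_char (s1 s2 : List Char) :
    ∀ j ≤ s2.length, (pvLastRowB s1 s2).getD j ((0:Int),[])
      = (pvE s1 s2 s1.length j, pvRT s1 s2 s1.length j) := by
  have key : ∀ k, k ≤ s1.length →
      ∀ j ≤ s2.length, ((List.range k).foldl (fun row i0 => pvSweepRowB s1 s2 row (i0+1))
        (pvRow0B s2.length)).getD j ((0:Int),[]) = (pvE s1 s2 k j, pvRT s1 s2 k j) := by
    intro k
    induction k with
    | zero =>
      intro _
      simp only [List.range_zero, List.foldl_nil]
      exact (pvRow0B_char s1 s2).2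
    | succ k ih =>
      intro hk
      rw [pv_foldl_range_succ]
      exact (pvSweepRowB_char s1 s2 _ k (ih (by omega))).2
  intro j hj
  rw [pvLastRowB]
  exact key s1.length (le_refl _) j hj

-- ---- B's chain is exactly A's traceback list ----

theorem pvRT_eq_tb (s1 s2 : List Char) :
    ∀ (N i j : Nat), i + j ≤ N → i ≤ s1.length → j ≤ s2.length →
    pvRT s1 s2 i j = pvTbA s1 s2 (pvDpA s1 s2) N i j := by
  intro N
  induction N with
  | zero =>
    intro i j hf hi hj
    have h1 : i = 0 := by omega
    have h2 : j = 0 := by omega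
    subst h1; subst h2
    rw [pvRT_00, pvTbA]
  | succ N ih =>
    intro i j hf hi hj
    by_cases hij : i > 0 ∨ j > 0
    · have hA := pvDpA_char s1 s2
      rw [pvRT, if_pos hij]
      show _ = (if i > 0 ∨ j > 0 then _ else _)
      rw [if_pos hij]
      rw [hA i hi j hj, hA (i-1) (by omega) j hj, hA i hi (j-1) (by omega)]
      by_cases hC1 : i > 0 ∧ pvE s1 s2 i j = pvE s1 s2 (i-1) j + 1
      · rw [if_pos hC1, if_pos hC1, ih (i-1) j (by omega) (by omega) hj]
      · rw [if_neg hC1, if_neg hC1]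
        by_cases hC2 : j > 0 ∧ pvE s1 s2 i j = pvE s1 s2 i (j-1) + 1
        · rw [if_pos hC2, if_pos hC2, ih i (j-1) (by omega) hi (by omega)]
        · rw [if_neg hC2, if_neg hC2, ih (i-1) (j-1) (by omega) (by omega) (by omega)]
    · rw [pvRT, if_neg hij]
      show _ = (if i > 0 ∨ j > 0 then _ else _)
      rw [if_neg hij]

-- ---- the traceback list is nonempty and contains no empty string ----

theorem pvTbA_ne_nil (s1 s2 : List Char) (d : List (List Int)) {fuel i j : Nat}
    (h : 0 < i + j) (hf : 0 < fuel) : pvTbA s1 s2 d fuel i j ≠ [] := by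
  obtain ⟨fuel', rfl⟩ : ∃ f, fuel = f + 1 := ⟨fuel - 1, by omega⟩
  show (if i > 0 ∨ j > 0 then _ else _) ≠ []
  rw [if_pos (by omega : i > 0 ∨ j > 0)]
  split_ifs <;> simp

theorem pvTbA_all_ne (s1 s2 : List Char) (d : List (List Int)) :
    ∀ (N i j : Nat), ∀ x ∈ pvTbA s1 s2 d N i j, x ≠ "" := by
  intro N
  induction N with
  | zero =>
    intro i j x hx
    rw [pvTbA] at hx
    simp at hx
  | succ N ih =>
    intro i j x hx
    by_cases hij : i > 0 ∨ j > 0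
    · rw [show pvTbA s1 s2 d (N+1) i j = (if i > 0 ∨ j > 0 then
          if i > 0 ∧ pvMget d i j = pvMget d (i-1) j + 1 then
            "D" :: pvTbA s1 s2 d N (i-1) j
          else if j > 0 ∧ pvMget d i j = pvMget d i (j-1) + 1 then
            "I" :: pvTbA s1 s2 d N i (j-1)
          else
            (if s1.getD (i-1) ' ' = s2.getD (j-1) ' ' then "M" else "X") ::
              pvTbA s1 s2 d N (i-1) (j-1)
        else []) from rfl, if_pos hij] at hx
      split_ifs at hx with h1 h2 h3
      · rcases List.mem_cons.mp hx with rfl | hm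
        · decide
        · exact ih (i-1) j x hm
      · rcases List.mem_cons.mp hx with rfl | hm
        · decide
        · exact ih i (j-1) x hm
      · rcases List.mem_cons.mp hx with rfl | hm
        · decide
        · exact ih (i-1) (j-1) x hm
      · rcases List.mem_cons.mp hx with rfl | hm
        · decide
        · exact ih (i-1) (j-1) x hm
    · rw [show pvTbA s1 s2 d (N+1) i j = (if i > 0 ∨ j > 0 then
          if i > 0 ∧ pvMget d i j = pvMget d (i-1) j + 1 then
            "D" :: pvTbA s1 s2 d N (i-1) j
          else if j > 0 ∧ pvMget d i j = pvMget d i (j-1) + 1 then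
            "I" :: pvTbA s1 s2 d N i (j-1)
          else
            (if s1.getD (i-1) ' ' = s2.getD (j-1) ' ' then "M" else "X") ::
              pvTbA s1 s2 d N (i-1) (j-1)
        else []) from rfl, if_neg hij] at hx
      simp at hx

-- ---- run decomposition shared by the two compressors ----

def pvRunsGo (last : String) (cnt : Int) : List String → List (Int × String)
  | [] => [(cnt, last)]
  | c :: rest => if c = last then pvRunsGo last (cnt+1) rest else (cnt, last) :: pvRunsGo c 1 rest

def pvRuns : List String → List (Int × String)
  | [] => []
  | a :: l => pvRunsGo a 1 l

def pvEnc (r : Int × String) : String := PySem.Int.toStr r.1 ++ r.2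

def pvConsRun (a : String) : List (Int × String) → List (Int × String)
  | [] => [(1, a)]
  | (c, b) :: t => if a = b then (c+1, b) :: t else (1, a) :: (c, b) :: t

def pvSnocRun : List (Int × String) → String → List (Int × String)
  | [], a => [(1, a)]
  | [(c, b)], a => if a = b then [(c+1, b)] else [(c, b), (1, a)]
  | r :: s :: t, a => r :: pvSnocRun (s :: t) a

theorem pvRunsGo_char : ∀ (l : List String) (a : String) (k : Int),
    pvRunsGo a k l = ((k + (pvCountRun a l : Int)), a) :: pvRuns (l.drop (pvCountRun a l)) := by
  intro l
  induction l with
  | nil => intro a k; simp [pvRunsGo, pvRuns, pvCountRun]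
  | cons c t ih =>
    intro a k
    by_cases hc : c = a
    · subst hc
      rw [pvRunsGo, if_pos rfl, ih c (k+1)]
      have h1 : pvCountRun c (c :: t) = 1 + pvCountRun c t := by
        rw [pvCountRun, if_pos rfl]
      rw [h1]
      have h2 : (c :: t).drop (1 + pvCountRun c t) = t.drop (pvCountRun c t) := by
        rw [Nat.add_comm, List.drop_succ_cons]
      rw [h2]
      congr 1
      push_cast
      ring_nf
    · rw [pvRunsGo, if_neg hc]
      have h1 : pvCountRun a (c :: t) = 0 := by
        rw [pvCountRun, if_neg hc]
      rw [h1]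
      simp [pvRuns]

theorem pvRleB_eq : ∀ (N : Nat) (l : List String), l.length ≤ N →
    pvRleB N l = (pvRuns l).map pvEnc := by
  intro N
  induction N with
  | zero =>
    intro l h
    have : l = [] := by
      cases l with
      | nil => rfl
      | cons a t => simp at h
    subst this
    simp [pvRleB, pvRuns]
  | succ N ih =>
    intro l h
    cases l with
    | nil => simp [pvRleB, pvRuns]
    | cons a t =>
      simp only [pvRleB]
      have hdrop : (a :: t).drop (1 + pvCountRun a t) = t.drop (pvCountRun a t) := by
        rw [Nat.add_comm, List.drop_succ_cons]
      rw [hdrop, ih (t.drop (pvCountRun a t)) (by simp at h ⊢; omega)]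
      rw [pvRuns, pvRunsGo_char]
      rw [List.map_cons]
      congr 1

theorem pvRuns_cons (a : String) (l : List String) :
    pvRuns (a :: l) = pvConsRun a (pvRuns l) := by
  cases l with
  | nil => simp [pvRuns, pvRunsGo, pvConsRun]
  | cons c t =>
    have hL : pvRuns (a :: c :: t) = pvRunsGo a 1 (c :: t) := rfl
    have hR : pvRuns (c :: t) = pvRunsGo c 1 t := rfl
    rw [hL, hR, pvRunsGo]
    by_cases hc : c = a
    · rw [if_pos hc, ← hc]
      rw [pvRunsGo_char t c (1+1), pvRunsGo_char t c 1, pvConsRun, if_pos rfl]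
      congr 1
      push_cast
      ring_nf
    · rw [if_neg hc, pvRunsGo_char t c 1, pvConsRun, if_neg (Ne.symm hc),
        ← pvRunsGo_char t c 1]

theorem pvSnocRun_append : ∀ (xs : List (Int × String)) (p : Int × String) (a : String),
    pvSnocRun (xs ++ [p]) a = xs ++ pvSnocRun [p] a := by
  intro xs
  induction xs with
  | nil => intro p a; simp
  | cons x xs ih =>
    intro p a
    cases xs with
    | nil => simp [pvSnocRun]
    | cons y ys =>
      have h1 : pvSnocRun ((x :: y :: ys) ++ [p]) a = x :: pvSnocRun ((y :: ys) ++ [p]) a := by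
        simp only [List.cons_append, pvSnocRun]
      rw [h1, ih p a]
      simp

theorem pvConsSnoc_comm : ∀ (rs : List (Int × String)) (x a : String),
    pvConsRun x (pvSnocRun rs a) = pvSnocRun (pvConsRun x rs) a := by
  intro rs
  match rs with
  | [] =>
    intro x a
    by_cases h : x = a
    · subst h; simp [pvConsRun, pvSnocRun]
    · simp [pvConsRun, pvSnocRun, h, Ne.symm h]
  | [(c, b)] =>
    intro x a
    by_cases h1 : x = b <;> by_cases h2 : a = b <;>
      simp [pvConsRun, pvSnocRun, h1, h2]
  | r :: s :: t =>
    intro x a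
    obtain ⟨c, b⟩ := r
    by_cases h1 : x = b
    · simp [pvSnocRun, pvConsRun, h1]
    · simp [pvSnocRun, pvConsRun, h1]

theorem pvRuns_append_singleton : ∀ (l : List String) (a : String),
    pvRuns (l ++ [a]) = pvSnocRun (pvRuns l) a := by
  intro l
  induction l with
  | nil => intro a; simp [pvRuns, pvRunsGo, pvSnocRun]
  | cons x l ih =>
    intro a
    have h1 : (x :: l) ++ [a] = x :: (l ++ [a]) := by simp
    rw [h1, pvRuns_cons, ih a, pvConsSnoc_comm, ← pvRuns_cons]

theorem pvSnocRun_reverse : ∀ (rs : List (Int × String)) (a : String),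
    pvSnocRun rs.reverse a = (pvConsRun a rs).reverse := by
  intro rs a
  cases rs with
  | nil => simp [pvSnocRun, pvConsRun]
  | cons r t =>
    obtain ⟨c, b⟩ := r
    have h1 : ((c, b) :: t).reverse = t.reverse ++ [(c, b)] := by simp
    rw [h1, pvSnocRun_append]
    by_cases h : a = b
    · simp [pvSnocRun, pvConsRun, h]
    · simp [pvSnocRun, pvConsRun, h]

theorem pvRuns_reverse : ∀ (l : List String), pvRuns l.reverse = (pvRuns l).reverse := by
  intro l
  induction l with
  | nil => simp [pvRuns]
  | cons a l ih =>
    have h1 : (a :: l).reverse = l.reverse ++ [a] := by simp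
    rw [h1, pvRuns_append_singleton, ih, pvSnocRun_reverse, ← pvRuns_cons]

-- ---- A's compressor produces the reversed encoded runs ----

theorem pvCompFold : ∀ (xs : List String) (out : List String) (last : String) (cnt : Int),
    last ≠ "" → (∀ x ∈ xs, x ≠ "") →
    ((xs ++ [""]).foldl pvCompStep (out, last, cnt)).1 = out ++ (pvRunsGo last cnt xs).map pvEnc := by
  intro xs
  induction xs with
  | nil =>
    intro out last cnt hl _
    simp only [List.nil_append, List.foldl_cons, List.foldl_nil]
    rw [pvCompStep, if_neg (Ne.symm hl)]
    simp [pvRunsGo, pvEnc]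
  | cons c rest ih =>
    intro out last cnt hl hxs
    simp only [List.cons_append, List.foldl_cons]
    by_cases hc : c = last
    · rw [pvCompStep, if_pos hc]
      rw [ih out last (cnt+1) hl (fun x hx => hxs x (List.mem_cons_of_mem _ hx))]
      rw [pvRunsGo, if_pos hc]
    · rw [pvCompStep, if_neg hc]
      rw [ih (out ++ [PySem.Int.toStr cnt ++ last]) c 1
        (hxs c (List.mem_cons_self)) (fun x hx => hxs x (List.mem_cons_of_mem _ hx))]
      rw [pvRunsGo, if_neg hc]
      simp [pvEnc]

theorem pvCompA_eq (a : String) (l : List String) (ha : a ≠ "") (hl : ∀ x ∈ l, x ≠ "") :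
    pvCompA (a :: l) = PySem.Str.join "" (((pvRuns (a :: l)).map pvEnc).reverse) := by
  rw [pvCompA]
  simp only [PySem.List.pyGet?_zero_cons, Option.getD_some, List.drop_one, List.tail_cons]
  rw [pvCompFold l [] a 1 ha hl]
  simp [pvRuns]

-- ===== VERDICT (by name: the statement is the Claim_ definition above) =====
theorem CIGAR_spec : Claim_equal_CIGAR := by
  unfold Claim_equal_CIGAR
  intro str1 str2 _ hpre
  unfold Spec_CIGAR
  have hne : str1.toList ≠ [] ∨ str2.toList ≠ [] := by
    by_contra hc
    push_neg at hc
    exact hpre ⟨String.toList_eq_nil_iff.mp hc.1, String.toList_eq_nil_iff.mp hc.2⟩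
  have hmn : 0 < str1.toList.length + str2.toList.length := by
    rcases hne with h | h
    · have := List.length_pos_iff.mpr h; omega
    · have := List.length_pos_iff.mpr h; omega
  simp only [CIGAR, CIGAR_alt]
  rw [pvLastRowB_char str1.toList str2.toList str2.toList.length (le_refl _)]
  simp only
  rw [pvRT_eq_tb str1.toList str2.toList
    (str1.toList.length + str2.toList.length) str1.toList.length str2.toList.length
    (le_refl _) (le_refl _) (le_refl _)]
  rcases h : pvTbA str1.toList str2.toList (pvDpA str1.toList str2.toList)
      (str1.toList.length + str2.toList.length) str1.toList.length str2.toList.length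
      with _ | ⟨a, l⟩
  · exact absurd h (pvTbA_ne_nil _ _ _ hmn hmn)
  · have hmem : ∀ x ∈ a :: l, x ≠ "" := by
      rw [← h]
      exact pvTbA_all_ne str1.toList str2.toList _
        (str1.toList.length + str2.toList.length) _ _
    rw [pvCompA_eq a l (hmem a List.mem_cons_self) (fun x hx => hmem x (List.mem_cons_of_mem _ hx)),
      pvRleB_eq (a :: l).reverse.length _ (le_refl _), pvRuns_reverse, List.map_reverse]
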